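-- pv_equiv track=rewrite | github.com/ccw-oht/newspaper-auditor | backend/audit.py | _find_pattern_matches
-- ===== SOURCE A (Python) =====
-- def _find_pattern_matches(values: list[str], patterns: list[str]) -> list[str]:
--     matches: list[str] = []
--     for value in values:
--         for pattern in patterns:
--             if pattern.lower() in value:
--                 matches.append(value)
--                 break
--     return matches
-- ===== SOURCE B (Python) =====
-- def _find_pattern_matches(values: list[str], patterns: list[str]) -> list[str]:
--     matched: set[int] = set()
--     for pattern in patterns:
--         p = pattern.lower()
--         for i, value in enumerate(values):
--             if i not in matched and p in value:
--                 matched.add(i)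
--     return [value for i, value in enumerate(values) if i in matched]
-- ===== Notes on version B (the rewrite author's own statement) =====
-- stated objective: alternative
-- what changed: A loops value-outer and re-lowers every pattern for every value with an early break; B loops pattern-outer, lowering each pattern once, marks matched value indices in a set (skipping already-matched indices), and finally emits the values whose index was marked, in original order.
import Mathlib
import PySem

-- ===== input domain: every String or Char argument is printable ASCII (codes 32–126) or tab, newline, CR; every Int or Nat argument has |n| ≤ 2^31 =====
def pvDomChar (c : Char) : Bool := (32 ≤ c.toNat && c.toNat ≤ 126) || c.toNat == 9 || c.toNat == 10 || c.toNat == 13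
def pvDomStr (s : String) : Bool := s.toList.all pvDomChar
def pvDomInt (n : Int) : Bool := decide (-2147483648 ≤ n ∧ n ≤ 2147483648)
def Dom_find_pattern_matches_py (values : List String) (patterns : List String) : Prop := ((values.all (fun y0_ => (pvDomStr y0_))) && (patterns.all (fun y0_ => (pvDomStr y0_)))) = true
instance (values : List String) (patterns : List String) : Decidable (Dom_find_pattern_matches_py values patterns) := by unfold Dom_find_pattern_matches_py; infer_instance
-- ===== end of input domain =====

-- B replaces A's value-outer loop (which re-lowers every pattern for every value) by a
-- pattern-outer sweep that lowers each pattern once and marks matched value indices in a set,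
-- then emits the marked values in order; objective: alternative (constant-factor mechanism).

-- ===== PORT A =====
-- inner 'for pattern in patterns: if pattern.lower() in value: matches.append(value); break'
def pvInnerA (value : String) (ms : List String) : List String → List String
  | [] => ms
  | pattern :: rest =>
    if PySem.Str.isIn (PySem.Str.lower pattern) value then ms ++ [value]
    else pvInnerA value ms rest

def find_pattern_matches_py (values : List String) (patterns : List String) : List String :=
  values.foldl (fun ms value => pvInnerA value ms patterns) []

-- ===== PORT B =====
-- 'matched' after the pattern-outer double loop
def pvMatched (values : List String) (patterns : List String) : PySem.Set Int :=
  patterns.foldl (fun s pattern =>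
    let p := PySem.Str.lower pattern
    (PySem.List.enumerate values 0).foldl (fun s iv =>
      if !(PySem.Set.contains s iv.1) && PySem.Str.isIn p iv.2 then PySem.Set.add s iv.1
      else s) s) PySem.Set.empty

def find_pattern_matches_py_alt (values : List String) (patterns : List String) : List String :=
  ((PySem.List.enumerate values 0).filter
      (fun iv => PySem.Set.contains (pvMatched values patterns) iv.1)).map (·.2)

-- ===== PRECONDITION & SPEC =====
def Spec_find_pattern_matches_py (values : List String) (patterns : List String) (out : List String) : Prop := out = find_pattern_matches_py_alt values patterns
instance (values : List String) (patterns : List String) (out : List String) : Decidable (Spec_find_pattern_matches_py values patterns out) := by unfold Spec_find_pattern_matches_py; infer_instance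

-- ===== CLAIM (what is proved, stated in full; the proofs are below) =====
def Claim_equal_find_pattern_matches_py : Prop := ∀ (values : List String) (patterns : List String), Dom_find_pattern_matches_py values patterns → Spec_find_pattern_matches_py values patterns (find_pattern_matches_py values patterns)

-- ===== LEMMAS AND PROOFS =====

-- the match predicate both programs decide, per value
def pvHit (patterns : List String) (v : String) : Bool :=
  patterns.any (fun p => PySem.Str.isIn (PySem.Str.lower p) v)

theorem pvInnerA_eq (value : String) (m : List String) (ps : List String) :
    pvInnerA value m ps = if pvHit ps value then m ++ [value] else m := by
  induction ps with
  | nil => simp [pvInnerA, pvHit]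
  | cons p rest ih =>
    show (if PySem.Str.isIn (PySem.Str.lower p) value then m ++ [value]
          else pvInnerA value m rest) = _
    rw [show pvHit (p :: rest) value
          = (PySem.Str.isIn (PySem.Str.lower p) value || pvHit rest value) from rfl]
    by_cases h : PySem.Str.isIn (PySem.Str.lower p) value
    · rw [if_pos h, h, Bool.true_or, if_pos rfl]
    · rw [if_neg h, ih, Bool.not_eq_true] at *
      rw [h, Bool.false_or]

theorem portA_eq_filter (values patterns : List String) :
    find_pattern_matches_py values patterns = values.filter (pvHit patterns) := by
  unfold find_pattern_matches_py
  have : ∀ (vs : List String) (acc : List String),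
      vs.foldl (fun ms value => pvInnerA value ms patterns) acc
        = acc ++ vs.filter (pvHit patterns) := by
    intro vs
    induction vs with
    | nil => intro acc; simp
    | cons v rest ih =>
      intro acc
      rw [List.foldl_cons, pvInnerA_eq]
      by_cases h : pvHit patterns v
      · rw [if_pos h, ih, List.filter_cons, if_pos h]
        simp
      · rw [if_neg h, ih, List.filter_cons, if_neg h]
  simpa using this values []

-- membership-in-the-marked-set characterisation of B's inner loop
theorem pvInnerB_mem (p : String) (pairs : List (Int × String)) (s : PySem.Set Int) (i : Int) :
    (i ∈ pairs.foldl (fun s iv =>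
        if !(PySem.Set.contains s iv.1) && PySem.Str.isIn p iv.2 then PySem.Set.add s iv.1
        else s) s) ↔
    i ∈ s ∨ ∃ iv ∈ pairs, iv.1 = i ∧ PySem.Str.isIn p iv.2 := by
  induction pairs generalizing s with
  | nil => simp
  | cons iv rest ih =>
    by_cases hc : PySem.Set.contains s iv.1
    · by_cases hin : PySem.Str.isIn p iv.2 <;>
      · simp only [List.foldl_cons, hc, hin]
        rw [ih]
        have hmem : iv.1 ∈ s := (PySem.Set.contains_iff s iv.1).1 hc
        constructor
        · rintro (h | ⟨jv, hj, h1, h2⟩)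
          · exact Or.inl h
          · exact Or.inr ⟨jv, List.mem_cons_of_mem _ hj, h1, h2⟩
        · rintro (h | ⟨jv, hj, h1, h2⟩)
          · exact Or.inl h
          · rcases List.mem_cons.1 hj with rfl | hj'
            · exact Or.inl (h1 ▸ hmem)
            · exact Or.inr ⟨jv, hj', h1, h2⟩
    · by_cases hin : PySem.Str.isIn p iv.2
      · simp only [List.foldl_cons, hc, hin]
        rw [if_pos (by simp)]
        rw [ih]
        simp only [PySem.Set.mem_add]
        constructor
        · rintro ((h | h) | ⟨jv, hj, h1, h2⟩)
          · exact Or.inl h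
          · exact Or.inr ⟨iv, List.mem_cons_self .., h.symm, hin⟩
          · exact Or.inr ⟨jv, List.mem_cons_of_mem _ hj, h1, h2⟩
        · rintro (h | ⟨jv, hj, h1, h2⟩)
          · exact Or.inl (Or.inl h)
          · rcases List.mem_cons.1 hj with rfl | hj'
            · exact Or.inl (Or.inr h1.symm)
            · exact Or.inr ⟨jv, hj', h1, h2⟩
      · simp only [List.foldl_cons, hc, hin]
        rw [if_neg (by simp)]
        rw [ih]
        constructor
        · rintro (h | ⟨jv, hj, h1, h2⟩)
          · exact Or.inl h
          · exact Or.inr ⟨jv, List.mem_cons_of_mem _ hj, h1, h2⟩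
        · rintro (h | ⟨jv, hj, h1, h2⟩)
          · exact Or.inl h
          · rcases List.mem_cons.1 hj with rfl | hj'
            · exact absurd h2 (by simpa using hin)
            · exact Or.inr ⟨jv, hj', h1, h2⟩

theorem pvOuterB_mem (patterns : List String) (pairs : List (Int × String)) (i : Int) :
    (i ∈ patterns.foldl (fun s pattern =>
        let p := PySem.Str.lower pattern
        pairs.foldl (fun s iv =>
          if !(PySem.Set.contains s iv.1) && PySem.Str.isIn p iv.2 then PySem.Set.add s iv.1
          else s) s) PySem.Set.empty) ↔
    ∃ iv ∈ pairs, iv.1 = i ∧ pvHit patterns iv.2 := by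
  have gen : ∀ (ps : List String) (s : PySem.Set Int),
      (i ∈ ps.foldl (fun s pattern =>
        let p := PySem.Str.lower pattern
        pairs.foldl (fun s iv =>
          if !(PySem.Set.contains s iv.1) && PySem.Str.isIn p iv.2 then PySem.Set.add s iv.1
          else s) s) s) ↔
      i ∈ s ∨ ∃ iv ∈ pairs, iv.1 = i ∧ pvHit ps iv.2 := by
    intro ps
    induction ps with
    | nil => intro s; simp [pvHit]
    | cons q rest ih =>
      intro s
      simp only [List.foldl_cons]
      rw [ih, pvInnerB_mem]
      constructor
      · rintro ((h | ⟨jv, hj, h1, h2⟩) | ⟨jv, hj, h1, h2⟩)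
        · exact Or.inl h
        · exact Or.inr ⟨jv, hj, h1, by
            simp only [pvHit, List.any_cons, Bool.or_eq_true]; exact Or.inl h2⟩
        · exact Or.inr ⟨jv, hj, h1, by
            simp only [pvHit, List.any_cons, Bool.or_eq_true]; exact Or.inr (by simpa [pvHit] using h2)⟩
      · rintro (h | ⟨jv, hj, h1, h2⟩)
        · exact Or.inl (Or.inl h)
        · simp only [pvHit, List.any_cons, Bool.or_eq_true] at h2
          rcases h2 with h2 | h2
          · exact Or.inl (Or.inr ⟨jv, hj, h1, h2⟩)
          · exact Or.inr ⟨jv, hj, h1, h2⟩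
  simpa using gen patterns PySem.Set.empty

theorem filter_map_enumerate (P : String → Bool) (values : List String) :
    ∀ s : Int, ((PySem.List.enumerate values s).filter (fun iv => P iv.2)).map (·.2)
      = values.filter P := by
  induction values with
  | nil => intro s; simp [PySem.List.enumerate_nil]
  | cons v rest ih =>
    intro s
    by_cases h : P v <;>
      simp [PySem.List.enumerate_cons, h, ih (s + 1)]

-- ===== VERDICT (by name: the statement is the Claim_ definition above) =====
theorem find_pattern_matches_py_spec : Claim_equal_find_pattern_matches_py := by
  intro values patterns _
  show find_pattern_matches_py values patterns = find_pattern_matches_py_alt values patterns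
  rw [portA_eq_filter]
  unfold find_pattern_matches_py_alt
  have hcong : ∀ iv ∈ PySem.List.enumerate values 0,
      PySem.Set.contains (pvMatched values patterns) iv.1 = pvHit patterns iv.2 := by
    intro iv hmem
    unfold pvMatched
    rcases (PySem.List.mem_enumerate_iff _ _ _).1 hmem with ⟨k, hk, rfl⟩
    by_cases hp : pvHit patterns values[k]
    · simp only [hp]
      exact (PySem.Set.contains_iff _ _).2
        ((pvOuterB_mem patterns (PySem.List.enumerate values 0) _).2
          ⟨(0 + (k:Int), values[k]), hmem, rfl, hp⟩)
    · simp only [hp, ← Bool.not_eq_true]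
      intro hc
      rcases (pvOuterB_mem patterns (PySem.List.enumerate values 0) _).1
        ((PySem.Set.contains_iff _ _).1 hc) with ⟨jv, hj, h1, h2⟩
      rcases (PySem.List.mem_enumerate_iff _ _ _).1 hj with ⟨k2, hk2, rfl⟩
      have hkk : k2 = k := by
        have := h1; simp at this; omega
      subst hkk
      exact absurd h2 (by simpa using hp)
  rw [List.filter_congr hcong]
  exact (filter_map_enumerate (pvHit patterns) values 0).symm
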